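-- pv_equiv track=rewrite | github.com/Arsined/ITAM_python_course_2022 | homeworks/chapter-2/2_B.py | key_difference
-- ===== SOURCE A (Python) =====
-- def key_difference(dict1: dict, dict2: dict) -> dict:
--     out = {}
--     for key, value in dict1.items():
--         if key in dict2:
--             if dict2[key] == value:
--                 out[key] = "equal"
--             else:
--                 out[key] = "changed"
--         else:
--             out[key] = "deleted"
--     for key, value in dict2.items():
--         if key not in dict1:
--             out[key] = "added"
--     return out
-- ===== SOURCE B (Python) =====
-- def key_difference(dict1: dict, dict2: dict) -> dict:
--     # Layered overwrites instead of per-key branching: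
--     # start with everything "deleted"/"added", then repair the overlap via set algebra.
--     out = dict.fromkeys(dict1, "deleted")
--     out.update(dict.fromkeys(dict2, "added"))
--     out.update(dict.fromkeys(dict1.keys() & dict2.keys(), "changed"))
--     out.update({key: "equal" for key, _ in dict1.items() & dict2.items()})
--     return out
-- ===== Notes on version B (the rewrite author's own statement) =====
-- stated objective: alternative
-- what changed: A classifies each key with per-key membership/equality branches in two loops; B has no per-key branching at all: it layers whole-dict overwrites (everything 'deleted', then 'added', then 'changed' on the key intersection, then 'equal' on the items intersection computed by set algebra), relying on dict overwrite keeping insertion position.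
import Mathlib
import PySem

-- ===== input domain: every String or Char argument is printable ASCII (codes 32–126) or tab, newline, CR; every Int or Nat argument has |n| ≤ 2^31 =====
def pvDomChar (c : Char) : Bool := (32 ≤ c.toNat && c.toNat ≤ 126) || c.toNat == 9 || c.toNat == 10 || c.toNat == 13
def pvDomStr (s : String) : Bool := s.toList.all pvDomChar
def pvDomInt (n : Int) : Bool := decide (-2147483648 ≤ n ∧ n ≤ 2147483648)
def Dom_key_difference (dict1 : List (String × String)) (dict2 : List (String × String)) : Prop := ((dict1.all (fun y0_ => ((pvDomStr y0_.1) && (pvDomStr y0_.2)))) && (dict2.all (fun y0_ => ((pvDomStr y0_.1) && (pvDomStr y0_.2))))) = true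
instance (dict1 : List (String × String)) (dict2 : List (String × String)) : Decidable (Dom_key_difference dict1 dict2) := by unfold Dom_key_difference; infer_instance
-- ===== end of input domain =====

-- B replaces A's per-key branch classification by layered whole-dict overwrites
-- ("deleted" everywhere, then "added", then repair the overlap via set algebra); objective: alternative.

-- ===== PORT A =====
def key_difference (dict1 : List (String × String)) (dict2 : List (String × String)) : List (String × String) :=
  let d1 := PySem.Dict.ofList dict1
  let d2 := PySem.Dict.ofList dict2
  -- out = {}; for key, value in dict1.items(): …
  let out : PySem.Dict String String :=
    d1.items.foldl (fun out kv =>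
      if d2.contains kv.1 then
        if d2.get? kv.1 == some kv.2 then out.insert kv.1 "equal"
        else out.insert kv.1 "changed"
      else out.insert kv.1 "deleted") PySem.Dict.empty
  -- for key, value in dict2.items(): if key not in dict1: out[key] = "added"
  let out2 : PySem.Dict String String :=
    d2.items.foldl (fun out kv =>
      if !(d1.contains kv.1) then out.insert kv.1 "added" else out) out
  out2.items

-- ===== PORT B =====
-- The two set intersections are iterated only to overwrite keys that are all already present
-- in 'out', so the final dict does not depend on the (hash-based) set iteration order;
-- PySem.Set.inter (first operand's order) is therefore an exact port of these update lines.
def key_difference_alt (dict1 : List (String × String)) (dict2 : List (String × String)) : List (String × String) :=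
  let d1 := PySem.Dict.ofList dict1
  let d2 := PySem.Dict.ofList dict2
  -- out = dict.fromkeys(dict1, "deleted")
  let out : PySem.Dict String String :=
    d1.keys.foldl (fun o k => o.insert k "deleted") PySem.Dict.empty
  -- out.update(dict.fromkeys(dict2, "added"))
  let out := d2.keys.foldl (fun o k => o.insert k "added") out
  -- out.update(dict.fromkeys(dict1.keys() & dict2.keys(), "changed"))
  let common := PySem.Set.inter d1.keys d2.keys
  let out := common.foldl (fun o k => o.insert k "changed") out
  -- out.update({key: "equal" for key, _ in dict1.items() & dict2.items()})
  let eqPairs := PySem.Set.inter d1.items d2.items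
  let out := eqPairs.foldl (fun o kv => o.insert kv.1 "equal") out
  out.items

-- ===== PRECONDITION & SPEC =====
def Spec_key_difference (dict1 : List (String × String)) (dict2 : List (String × String)) (out : List (String × String)) : Prop := out = key_difference_alt dict1 dict2
instance (dict1 : List (String × String)) (dict2 : List (String × String)) (out : List (String × String)) : Decidable (Spec_key_difference dict1 dict2 out) := by unfold Spec_key_difference; infer_instance

-- ===== CLAIM (what is proved, stated in full; the proofs are below) =====
def Claim_equal_key_difference : Prop := ∀ (dict1 : List (String × String)) (dict2 : List (String × String)), Dom_key_difference dict1 dict2 → Spec_key_difference dict1 dict2 (key_difference dict1 dict2)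

-- ===== LEMMAS AND PROOFS =====

-- A's first loop, with the branch-wise inserts gathered into one insert of a conditional value.
theorem pv_loop1_items (d1 d2 : PySem.Dict String String) (hnd : d1.keys.Nodup) :
    (d1.items.foldl (fun out kv =>
      if d2.contains kv.1 then
        if d2.get? kv.1 == some kv.2 then out.insert kv.1 "equal"
        else out.insert kv.1 "changed"
      else out.insert kv.1 "deleted") (PySem.Dict.empty : PySem.Dict String String)).items
    = d1.items.map (fun kv => (kv.1,
        if d2.contains kv.1 then
          if d2.get? kv.1 == some kv.2 then "equal" else "changed"
        else "deleted")) := by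
  have hfun : (fun (out : PySem.Dict String String) (kv : String × String) =>
      if d2.contains kv.1 then
        if d2.get? kv.1 == some kv.2 then out.insert kv.1 "equal"
        else out.insert kv.1 "changed"
      else out.insert kv.1 "deleted")
      = (fun out kv => out.insert kv.1
          (if d2.contains kv.1 then
            if d2.get? kv.1 == some kv.2 then "equal" else "changed"
          else "deleted")) := by
    funext out kv; split_ifs <;> rfl
  rw [hfun]
  have := PySem.Dict.items_foldl_insert_fresh (l := d1.items) (k := fun kv => kv.1)
      (v := fun kv => if d2.contains kv.1 then
            if d2.get? kv.1 == some kv.2 then "equal" else "changed"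
          else "deleted")
      (d := (PySem.Dict.empty : PySem.Dict String String))
      (by intro a _; simp [PySem.Dict.contains_empty])
      (by simpa [PySem.Dict.keys] using hnd)
  simpa [PySem.Dict.empty] using this

-- A's second loop appends (key, "added") for each dict2 item whose key is outside d1,
-- provided those keys are fresh for the accumulator and pairwise distinct.
theorem pv_loop2_items (d1 : PySem.Dict String String)
    (l : List (String × String)) (out : PySem.Dict String String)
    (hfresh : ∀ kv ∈ l, d1.contains kv.1 = false → out.contains kv.1 = false)
    (hnd : (l.map (·.1)).Nodup) :
    (l.foldl (fun out kv =>
      if !(d1.contains kv.1) then out.insert kv.1 "added" else out) out).items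
    = out.items ++ (l.filter (fun kv => !(d1.contains kv.1))).map (fun kv => (kv.1, "added")) := by
  induction l generalizing out with
  | nil => simp
  | cons kv rest ih =>
    simp only [List.map_cons, List.nodup_cons] at hnd
    simp only [List.foldl_cons, List.filter_cons]
    by_cases h1 : d1.contains kv.1
    · have hb : (!d1.contains kv.1) = false := by simp [h1]
      rw [hb]
      simp only [Bool.false_eq_true, if_false]
      rw [ih out (fun p hp hc => hfresh p (List.mem_cons_of_mem _ hp) hc) hnd.2]
    · have h1' : d1.contains kv.1 = false := by simpa using h1
      have hout : out.contains kv.1 = false := hfresh kv (List.mem_cons_self) h1'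
      have hb : (!d1.contains kv.1) = true := by simp [h1']
      rw [hb]
      simp only [if_true]
      rw [ih (out.insert kv.1 "added") ?_ hnd.2, PySem.Dict.items_insert]
      · simp [hout]
      · intro p hp hc
        have hne : p.1 ≠ kv.1 := by
          intro he; exact hnd.1 (he ▸ List.mem_map_of_mem hp)
        rw [PySem.Dict.contains_insert]
        simp [hne, hfresh p (List.mem_cons_of_mem _ hp) hc]

-- keys of an insert-fold: base keys, then the fresh keys in order.
theorem pv_set_update (base : List String) (l : List String) (hnd : l.Nodup) :
    PySem.Set.update base l = base ++ l.filter (fun k => !(decide (k ∈ base))) := by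
  induction l generalizing base with
  | nil => simp [PySem.Set.update]
  | cons k rest ih =>
    simp only [List.nodup_cons] at hnd
    simp only [PySem.Set.update, List.foldl_cons, List.filter_cons] at *
    by_cases hk : k ∈ base
    · have hadd : PySem.Set.add base k = base := by simp [PySem.Set.add, hk]
      rw [hadd, ih base hnd.2]
      simp [hk]
    · have hadd : PySem.Set.add base k = base ++ [k] := by simp [PySem.Set.add, hk]
      have hcond : (!decide (k ∈ base)) = true := by simp [hk]
      rw [hadd, ih (base ++ [k]) hnd.2, List.append_assoc, hcond, if_pos rfl]
      congr 1
      rw [List.singleton_append]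
      congr 1
      apply List.filter_congr
      intro x hx
      have hne : x ≠ k := fun he => hnd.1 (he ▸ hx)
      simp [hne]

-- B's building block: a fold that overwrites every key of 'l.map key' with the constant 'v'
-- rewrites the existing entries in place and appends the fresh keys in order.
theorem pv_overlay {β : Type} (l : List β) (key : β → String) (v : String)
    (d : PySem.Dict String String) (hnd : (l.map key).Nodup) :
    (l.foldl (fun o x => o.insert (key x) v) d).items
    = d.items.map (fun p => if p.1 ∈ l.map key then (p.1, v) else p)
      ++ (l.filter (fun x => !(d.contains (key x)))).map (fun x => (key x, v)) := by
  induction l generalizing d with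
  | nil => simp
  | cons x rest ih =>
    simp only [List.map_cons, List.nodup_cons] at hnd
    simp only [List.foldl_cons, List.filter_cons]
    by_cases hc : d.contains (key x)
    · have hb : (!d.contains (key x)) = false := by simp [hc]
      rw [hb]
      simp only [Bool.false_eq_true, if_false]
      rw [ih (d.insert (key x) v) hnd.2]
      rw [PySem.Dict.items_insert_of_contains _ _ hc]
      congr 1
      · rw [List.map_map]
        apply List.map_congr_left
        intro p _
        by_cases hpk : p.1 = key x
        · have hnm : key x ∉ rest.map key := hnd.1
          simp [Function.comp, hpk, hnm, List.mem_cons]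
        · simp only [Function.comp]
          have : (p.1 == key x) = false := by simp [hpk]
          simp only [this, Bool.false_eq_true, if_false]
          simp [List.mem_cons, hpk]
      · congr 1
        apply List.filter_congr
        intro y hy
        have hne : key y ≠ key x := by
          intro he; exact hnd.1 (he ▸ List.mem_map_of_mem hy)
        rw [PySem.Dict.contains_insert]
        simp [hne]
    · have hc' : d.contains (key x) = false := by simpa using hc
      have hb : (!d.contains (key x)) = true := by simp [hc']
      rw [hb]
      simp only [if_true]
      rw [ih (d.insert (key x) v) hnd.2]
      rw [PySem.Dict.items_insert_of_not_contains _ _ hc']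
      rw [List.map_append, List.append_assoc]
      congr 1
      · apply List.map_congr_left
        intro p hp
        have hpk : p.1 ≠ key x := by
          intro he
          have : d.contains p.1 = true := by
            rw [PySem.Dict.contains_iff_mem_keys]
            exact PySem.Dict.mem_keys_of_mem_items _ hp
          rw [he, hc'] at this; exact Bool.false_ne_true this
        simp [List.mem_cons, hpk]
      · have hone : List.map (fun p => if p.1 ∈ rest.map key then (p.1, v) else p)
            [(key x, v)] = [(key x, v)] := by
          simp
        rw [hone, List.singleton_append]
        congr 1
        congr 1
        apply List.filter_congr
        intro y hy
        have hne : key y ≠ key x := by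
          intro he; exact hnd.1 (he ▸ List.mem_map_of_mem hy)
        rw [PySem.Dict.contains_insert]
        simp [hne]

theorem key_difference_eq (dict1 dict2 : List (String × String)) :
    key_difference dict1 dict2 = key_difference_alt dict1 dict2 := by
  simp only [key_difference, key_difference_alt]
  set d1 := PySem.Dict.ofList dict1 with hd1
  set d2 := PySem.Dict.ofList dict2 with hd2
  have hnd1 : d1.keys.Nodup := PySem.Dict.nodup_keys_ofList dict1
  have hnd2 : d2.keys.Nodup := PySem.Dict.nodup_keys_ofList dict2
  have hnd1' : (d1.items.map (·.1)).Nodup := by simpa [PySem.Dict.keys] using hnd1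
  have hnd2' : (d2.items.map (·.1)).Nodup := by simpa [PySem.Dict.keys] using hnd2
  -- names for B's stages
  set K1 := d1.keys with hK1
  set K2 := d2.keys with hK2
  set S1 := List.foldl (fun o k => o.insert k "deleted") (PySem.Dict.empty : PySem.Dict String String) K1 with hS1
  set S2 := List.foldl (fun o k => o.insert k "added") S1 K2 with hS2
  set common := PySem.Set.inter K1 K2 with hcom
  set S3 := List.foldl (fun o k => o.insert k "changed") S2 common with hS3
  set eqPairs := PySem.Set.inter d1.items d2.items with heqp
  have hcommon_mem : ∀ k, k ∈ common ↔ (k ∈ K1 ∧ k ∈ K2) := by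
    intro k
    simp [hcom, PySem.Set.inter, List.mem_filter]
  have heq_sub : ∀ kv, kv ∈ eqPairs → kv ∈ d1.items ∧ kv ∈ d2.items := by
    intro kv hk
    rw [heqp] at hk
    simp only [PySem.Set.inter] at hk
    have h' := List.mem_filter.mp hk
    exact ⟨h'.1, by simpa using h'.2⟩
  have hndc : common.Nodup := by
    rw [hcom]; exact List.Nodup.filter _ hnd1
  -- keys / contains of the stages
  have hk1 : S1.keys = K1 := by
    have h := PySem.Dict.keys_foldl_insert (l := K1) (f := fun _ _ => "deleted")
      (d := (PySem.Dict.empty : PySem.Dict String String))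
    simp only [PySem.Dict.keys_empty] at h
    exact h.trans (PySem.Set.ofList_eq_self_of_nodup K1 hnd1)
  have hc1 : ∀ k, S1.contains k = decide (k ∈ K1) := by
    intro k; rw [PySem.Dict.contains_eq_decide_mem_keys, hk1]
  have hk2 : S2.keys = K1 ++ K2.filter (fun k => !(decide (k ∈ K1))) := by
    have h := PySem.Dict.keys_foldl_insert (l := K2) (f := fun _ _ => "added") (d := S1)
    rw [hk1] at h
    exact h.trans (pv_set_update K1 K2 hnd2)
  have hc2 : ∀ k, k ∈ K1 → S2.contains k = true := by
    intro k hk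
    rw [PySem.Dict.contains_eq_decide_mem_keys, hk2]
    simp [hk]
  have hc3 : ∀ k, k ∈ K1 → S3.contains k = true := by
    intro k hk
    have h := PySem.Dict.keys_foldl_insert (l := common) (f := fun _ _ => "changed") (d := S2)
    rw [pv_set_update _ _ hndc] at h
    rw [PySem.Dict.contains_eq_decide_mem_keys]
    have hmem : k ∈ S3.keys := by
      rw [h, hk2]
      exact List.mem_append_left _ (List.mem_append_left _ hk)
    simp [hmem]
  -- items of the stages
  have h1 : S1.items = K1.map (fun k => (k, "deleted")) := by
    have h := pv_overlay K1 (fun k => k) "deleted" (PySem.Dict.empty : PySem.Dict String String)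
      (by simpa using hnd1)
    simpa [PySem.Dict.empty, PySem.Dict.contains_empty] using h
  have h2 : S2.items = K1.map (fun k => ((k : String), if k ∈ K2 then ("added" : String) else "deleted"))
      ++ (K2.filter (fun k => !(decide (k ∈ K1)))).map (fun k => (k, "added")) := by
    have h := pv_overlay K2 (fun k => k) "added" S1 (by simpa using hnd2)
    rw [h1] at h
    simp only [List.map_map, List.map_id'] at h ⊢
    rw [h]
    congr 1
    · apply List.map_congr_left
      intro k _
      by_cases hk : k ∈ K2 <;> simp [Function.comp, hk]
    · congr 1
      apply List.filter_congr
      intro k _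
      rw [hc1 k]
  have h3 : S3.items = S2.items.map (fun p => if p.1 ∈ common then (p.1, ("changed" : String)) else p) := by
    have h := pv_overlay common (fun k => k) "changed" S2 (by simpa using hndc)
    have ht : common.filter (fun k => !(S2.contains k)) = [] := by
      apply List.filter_eq_nil_iff.mpr
      intro k hk
      simp [hc2 k ((hcommon_mem k).mp hk).1]
    simpa [ht] using h
  have hnd4 : (eqPairs.map (fun kv => kv.1)).Nodup := by
    have hsub : (eqPairs.map (fun kv => kv.1)).Sublist (d1.items.map (fun kv => kv.1)) := by
      rw [heqp]
      simp only [PySem.Set.inter]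
      exact List.Sublist.map _ List.filter_sublist
    exact hsub.nodup hnd1'
  have h4 : (List.foldl (fun o kv => o.insert kv.1 "equal") S3 eqPairs).items
      = S3.items.map (fun p => if p.1 ∈ eqPairs.map (fun kv => kv.1) then (p.1, ("equal" : String)) else p) := by
    have h := pv_overlay eqPairs (fun kv => kv.1) "equal" S3 hnd4
    have ht : eqPairs.filter (fun kv => !(S3.contains kv.1)) = [] := by
      apply List.filter_eq_nil_iff.mpr
      intro kv hk
      have : kv.1 ∈ K1 := by
        rw [hK1, PySem.Dict.keys]
        exact List.mem_map_of_mem (heq_sub kv hk).1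
      simp [hc3 kv.1 this]
    simpa [ht] using h
  -- the equal-pair membership test, characterised by d2's lookup
  have hEqMem : ∀ kv, kv ∈ d1.items →
      (kv.1 ∈ eqPairs.map (fun kv => kv.1) ↔ d2.get? kv.1 = some kv.2) := by
    intro kv hkv
    constructor
    · intro hmem
      obtain ⟨p, hp, hpk⟩ := List.mem_map.mp hmem
      obtain ⟨hp1, hp2⟩ := heq_sub p hp
      have hpe : p = kv := by
        have := List.inj_on_of_nodup_map (f := fun kv : String × String => kv.1)
          (by simpa using hnd1') hp1 hkv hpk
        exact this
      exact PySem.Dict.get?_of_mem_items d2 (hpe ▸ hp2) hnd2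
    · intro hget
      have hkv2 : kv ∈ d2.items := by
        have := (PySem.Dict.get?_eq_some_iff_mem_items d2 kv.1 kv.2 hnd2).mp hget
        simpa using this
      have : kv ∈ eqPairs := by
        rw [heqp]
        simp [PySem.Set.inter, List.mem_filter, hkv, hkv2]
      exact List.mem_map_of_mem this
  -- A side
  rw [pv_loop2_items d1 d2.items _ ?hfresh hnd2', pv_loop1_items d1 d2 hnd1]
  case hfresh =>
    intro kv _ hc
    have hkeys : (d1.items.foldl (fun out kv =>
        if d2.contains kv.1 then
          if d2.get? kv.1 == some kv.2 then out.insert kv.1 "equal"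
          else out.insert kv.1 "changed"
        else out.insert kv.1 "deleted") (PySem.Dict.empty : PySem.Dict String String)).keys
        = PySem.Set.update (PySem.Dict.empty : PySem.Dict String String).keys (d1.items.map (·.1)) := by
      have hfun : (fun (out : PySem.Dict String String) (kv : String × String) =>
          if d2.contains kv.1 then
            if d2.get? kv.1 == some kv.2 then out.insert kv.1 "equal"
            else out.insert kv.1 "changed"
          else out.insert kv.1 "deleted")
          = (fun out kv => out.insert kv.1
              (if d2.contains kv.1 then
                if d2.get? kv.1 == some kv.2 then "equal" else "changed"
              else "deleted")) := by
        funext out kv; split_ifs <;> rfl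
      rw [hfun]
      exact PySem.Dict.keys_foldl_insert_key _ _ _ _
    rw [PySem.Dict.contains_eq_decide_mem_keys, hkeys,
        pv_set_update _ _ hnd1']
    simp only [PySem.Dict.keys_empty, List.nil_append, decide_eq_false_iff_not]
    intro hmem
    rcases List.mem_filter.mp hmem with ⟨hmem', _⟩
    rcases List.mem_map.mp hmem' with ⟨p, hp, hpk⟩
    have : kv.1 ∈ d1.keys := by
      rw [PySem.Dict.keys]; exact hpk ▸ List.mem_map_of_mem hp
    rw [PySem.Dict.contains_eq_decide_mem_keys] at hc
    simp [this] at hc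
  -- B side assembled
  rw [h4, h3, h2]
  rw [List.map_append, List.map_append, List.map_map, List.map_map]
  congr 1
  · -- heads: classify dict1's keys identically
    rw [hK1, PySem.Dict.keys, List.map_map]
    apply List.map_congr_left
    intro kv hkv
    have hget1 : d1.get? kv.1 = some kv.2 := PySem.Dict.get?_of_mem_items d1 hkv hnd1
    have hmemK1 : kv.1 ∈ K1 := by
      rw [hK1, PySem.Dict.keys]; exact List.mem_map_of_mem hkv
    have hmemK2 : kv.1 ∈ K2 ↔ d2.contains kv.1 = true :=
      (PySem.Dict.contains_iff_mem_keys d2 kv.1).symm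
    simp only [Function.comp]
    by_cases hc : d2.contains kv.1 = true
    · have hK2m : kv.1 ∈ K2 := hmemK2.mpr hc
      have hcm : kv.1 ∈ common := (hcommon_mem kv.1).mpr ⟨hmemK1, hK2m⟩
      by_cases hv : d2.get? kv.1 = some kv.2
      · have hEq : kv.1 ∈ eqPairs.map (fun kv => kv.1) := (hEqMem kv hkv).mpr hv
        simp [hc, hcm, hEq, hv]
      · have hEq : kv.1 ∉ eqPairs.map (fun kv => kv.1) := fun h => hv ((hEqMem kv hkv).mp h)
        have hbeq : (d2.get? kv.1 == some kv.2) = false := by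
          simpa using hv
        simp [hc, hcm, hEq, hbeq]
    · have hK2m : kv.1 ∉ K2 := fun h => hc (hmemK2.mp h)
      have hcm : kv.1 ∉ common := fun h => hK2m ((hcommon_mem kv.1).mp h).2
      have hEq : kv.1 ∉ eqPairs.map (fun kv => kv.1) := by
        intro h
        exact hc (by
          have hv := (hEqMem kv hkv).mp h
          rw [PySem.Dict.contains_eq_isSome_get?, hv]; rfl)
      simp [hc, hK2m, hcm, hEq]
  · -- tails: dict2-only keys are "added" in both
    rw [hK2, PySem.Dict.keys, List.filter_map, List.map_map]
    have hfil : List.filter ((fun k => !(decide (k ∈ K1))) ∘ fun x => x.1) d2.items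
              = List.filter (fun kv => !(d1.contains kv.1)) d2.items := by
      apply List.filter_congr
      intro kv _
      simp [Function.comp, hK1, PySem.Dict.contains_eq_decide_mem_keys]
    rw [hfil]
    simp only [List.map_map]
    apply List.map_congr_left
    intro kv hkv
    rcases List.mem_filter.mp hkv with ⟨_, hnot⟩
    have hnK1 : kv.1 ∉ K1 := by
      rw [hK1, ← PySem.Dict.contains_iff_mem_keys]
      simpa using hnot
    have hcm : kv.1 ∉ common := fun h => hnK1 ((hcommon_mem kv.1).mp h).1
    have hEq : kv.1 ∉ eqPairs.map (fun kv => kv.1) := by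
      intro h
      obtain ⟨p, hp, hpk⟩ := List.mem_map.mp h
      exact hnK1 (by
        rw [hK1, PySem.Dict.keys]
        exact hpk ▸ List.mem_map_of_mem (heq_sub p hp).1)
    simp [Function.comp, hcm, hEq]

-- ===== VERDICT (by name: the statement is the Claim_ definition above) =====
theorem key_difference_spec : Claim_equal_key_difference := by
  intro dict1 dict2 _
  unfold Spec_key_difference
  exact key_difference_eq dict1 dict2
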